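-- pv_equiv track=rewrite | github.com/surt1yo/Python | main.py | square_values_in_range
-- ===== SOURCE A (Python) =====
-- def square_values_in_range(start, end):
--     even_squares = []
--     odd_squares = []
--     for num in range(start, end + 1):
--         square = num ** 2
--         if square % 2 == 0:
--             even_squares.append(square)
--         else:
--             odd_squares.append(square)
--     return even_squares, odd_squares
-- ===== SOURCE B (Python) =====
-- def square_values_in_range(start, end):
--     # square parity equals base parity: index each parity class directly with a stride-2 range
--     even_start = start + start % 2
--     odd_start = start + (start + 1) % 2
--     even_squares = [x ** 2 for x in range(even_start, end + 1, 2)]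
--     odd_squares = [x ** 2 for x in range(odd_start, end + 1, 2)]
--     return even_squares, odd_squares
-- ===== Notes on version B (the rewrite author's own statement) =====
-- stated objective: alternative
-- what changed: Replaces the single branching loop (square each number, test square % 2, append to one of two lists) with two branch-free stride-2 range comprehensions, one per parity class, using the fact that a square's parity equals its base's parity.
import Mathlib
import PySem

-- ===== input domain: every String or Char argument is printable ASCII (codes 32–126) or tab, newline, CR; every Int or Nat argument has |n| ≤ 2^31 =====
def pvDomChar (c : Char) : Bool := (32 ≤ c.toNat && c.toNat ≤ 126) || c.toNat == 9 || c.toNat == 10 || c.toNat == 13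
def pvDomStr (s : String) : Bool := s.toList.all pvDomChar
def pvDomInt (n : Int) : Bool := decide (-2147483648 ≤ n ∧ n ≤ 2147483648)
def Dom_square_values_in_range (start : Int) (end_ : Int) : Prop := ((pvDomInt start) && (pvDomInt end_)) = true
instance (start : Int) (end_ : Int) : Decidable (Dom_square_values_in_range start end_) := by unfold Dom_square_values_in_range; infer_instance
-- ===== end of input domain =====

-- B replaces A's branching loop with two stride-2 range comprehensions (one per parity class); same cost, no per-element branch.

-- ===== PORT A =====
def square_values_in_range (start : Int) (end_ : Int) : List Int × List Int :=
  (PySem.List.pyRange start (end_ + 1) 1).foldl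
    (fun acc num =>
      let square := num ^ 2
      if PySem.Int.mod square 2 = 0 then (acc.1 ++ [square], acc.2)
      else (acc.1, acc.2 ++ [square]))
    ([], [])

-- ===== PORT B =====
def square_values_in_range_alt (start : Int) (end_ : Int) : List Int × List Int :=
  let even_start := start + PySem.Int.mod start 2
  let odd_start := start + PySem.Int.mod (start + 1) 2
  ((PySem.List.pyRange even_start (end_ + 1) 2).map (fun x => x ^ 2),
   (PySem.List.pyRange odd_start (end_ + 1) 2).map (fun x => x ^ 2))

-- ===== PRECONDITION & SPEC =====
def Spec_square_values_in_range (start : Int) (end_ : Int) (out : List Int × List Int) : Prop := out = square_values_in_range_alt start end_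
instance (start : Int) (end_ : Int) (out : List Int × List Int) : Decidable (Spec_square_values_in_range start end_ out) := by unfold Spec_square_values_in_range; infer_instance

-- ===== CLAIM (what is proved, stated in full; the proofs are below) =====
def Claim_equal_square_values_in_range : Prop := ∀ (start : Int) (end_ : Int), Dom_square_values_in_range start end_ → Spec_square_values_in_range start end_ (square_values_in_range start end_)

-- ===== LEMMAS AND PROOFS =====

lemma pyRange_two_nil (a b : Int) (h : b ≤ a) : PySem.List.pyRange a b 2 = [] := by
  rw [PySem.List.pyRange_of_pos a b (by norm_num)]
  simp [show ¬ a < b by omega]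

lemma pyRange_two_cons (a b : Int) (h : a < b) :
    PySem.List.pyRange a b 2 = a :: PySem.List.pyRange (a + 2) b 2 := by
  rw [PySem.List.pyRange_of_pos a b (by norm_num), PySem.List.pyRange_of_pos (a + 2) b (by norm_num)]
  by_cases h2 : a + 2 < b
  · rw [if_pos h, if_pos h2]
    have hc : ((b - a + 2 - 1) / 2).toNat = ((b - (a + 2) + 2 - 1) / 2).toNat + 1 := by omega
    rw [hc, List.range_succ_eq_map]
    simp only [List.map_cons, List.map_map]
    refine List.cons_eq_cons.mpr ⟨by norm_num, ?_⟩
    apply List.map_congr_left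
    intro k _
    simp [Function.comp]
    ring
  · rw [if_pos h, if_neg h2]
    have hc : ((b - a + 2 - 1) / 2).toNat = 1 := by omega
    simp [hc, List.range_succ]

lemma key (b : Int) : ∀ (n : Nat) (a : Int) (e0 o0 : List Int), (b - a).toNat ≤ n →
    (PySem.List.pyRange a b 1).foldl
      (fun acc num =>
        let square := num ^ 2
        if PySem.Int.mod square 2 = 0 then (acc.1 ++ [square], acc.2)
        else (acc.1, acc.2 ++ [square]))
      (e0, o0)
    = (e0 ++ (PySem.List.pyRange (a + PySem.Int.mod a 2) b 2).map (fun x => x ^ 2),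
       o0 ++ (PySem.List.pyRange (a + PySem.Int.mod (a + 1) 2) b 2).map (fun x => x ^ 2)) := by
  intro n
  induction n with
  | zero =>
    intro a e0 o0 hn
    have hba : b ≤ a := by omega
    rw [PySem.List.pyRange_one_eq_nil hba,
        pyRange_two_nil _ _ (by have := PySem.Int.mod_two_eq a; omega),
        pyRange_two_nil _ _ (by have := PySem.Int.mod_two_eq (a + 1); omega)]
    simp
  | succ n ih =>
    intro a e0 o0 hn
    by_cases hab : a < b
    · rw [PySem.List.pyRange_one_cons hab]
      have hma := PySem.Int.mod_eq_emod_of_pos (a:=a) (by norm_num : (0:Int) < 2)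
      have hma1 := PySem.Int.mod_eq_emod_of_pos (a:=a+1) (by norm_num : (0:Int) < 2)
      have hma2 := PySem.Int.mod_eq_emod_of_pos (a:=a+1+1) (by norm_num : (0:Int) < 2)
      have hmsq := PySem.Int.mod_eq_emod_of_pos (a:=a^2) (by norm_num : (0:Int) < 2)
      have hsq : a ^ 2 % 2 = (a % 2 * (a % 2)) % 2 := by
        rw [sq a]; exact Int.mul_emod a a 2
      rcases PySem.Int.mod_two_eq a with he | ho
      · -- a even, so a^2 even
        have h0 : a % 2 = 0 := by omega
        simp only [List.foldl_cons]
        rw [if_pos (by rw [hmsq, hsq, h0]; norm_num)]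
        rw [ih (a + 1) (e0 ++ [a ^ 2]) o0 (by omega)]
        rw [he, add_zero, pyRange_two_cons a b hab]
        have h1 : a + 1 + PySem.Int.mod (a + 1) 2 = a + 2 := by rw [hma1]; omega
        have h2 : a + 1 + PySem.Int.mod (a + 1 + 1) 2 = a + 1 := by rw [hma2]; omega
        have h3 : a + PySem.Int.mod (a + 1) 2 = a + 1 := by rw [hma1]; omega
        rw [h1, h2, h3]
        simp
      · -- a odd, so a^2 odd
        have h1m : a % 2 = 1 := by omega
        simp only [List.foldl_cons]
        rw [if_neg (by rw [hmsq, hsq, h1m]; norm_num)]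
        rw [ih (a + 1) e0 (o0 ++ [a ^ 2]) (by omega)]
        have h0 : a + PySem.Int.mod a 2 = a + 1 := by omega
        have h1 : a + 1 + PySem.Int.mod (a + 1) 2 = a + 1 := by rw [hma1]; omega
        have h2 : a + 1 + PySem.Int.mod (a + 1 + 1) 2 = a + 2 := by rw [hma2]; omega
        have h3 : a + PySem.Int.mod (a + 1) 2 = a := by rw [hma1]; omega
        rw [h0, h1, h2, h3, pyRange_two_cons a b hab]
        simp
    · rw [PySem.List.pyRange_one_eq_nil (by omega),
          pyRange_two_nil _ _ (by have := PySem.Int.mod_two_eq a; omega),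
          pyRange_two_nil _ _ (by have := PySem.Int.mod_two_eq (a + 1); omega)]
      simp

-- ===== VERDICT (by name: the statement is the Claim_ definition above) =====
theorem square_values_in_range_spec : Claim_equal_square_values_in_range := by
  intro start end_ _
  unfold Spec_square_values_in_range square_values_in_range square_values_in_range_alt
  rw [key (end_ + 1) (end_ + 1 - start).toNat start [] [] (le_refl _)]
  simp
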